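-- pv_equiv track=rewrite | github.com/longsizhuo/AlgorithmPractice | loong's code/contest/spare/K.py | kudzu_kniving
-- ===== SOURCE A (Python) =====
-- MOD = 10 ** 9 + 7
--
-- def kudzu_kniving(a, m, queries):
--     results = []
--     for v in queries:
--         # Determine the depth of the node v
--         depth = 0
--         while v >= (1 << depth):
--             v -= (1 << depth)
--             depth += 1
--
--         # Number of vertices in the subtree rooted at v is 2^(a-depth)
--         subtree_size = pow(2, a - depth, MOD)
--         results.append(subtree_size)
--
--     return results
-- ===== SOURCE B (Python) =====
-- MOD = 10 ** 9 + 7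
--
-- def kudzu_kniving(a, m, queries):
--     # depth of node v in the implicit binary tree is (v+1).bit_length()-1;
--     # nonpositive v has depth 0 (matches the loop, which never runs there)
--     return [pow(2, a - ((v + 1).bit_length() - 1 if v > 0 else 0), MOD)
--             for v in queries]
-- ===== Notes on version B (the rewrite author's own statement) =====
-- stated objective: idiomatic
-- what changed: The per-query bit-subtracting while loop that derives the node depth is replaced by the closed form (v+1).bit_length()-1 (0 for nonpositive v), so the whole function becomes a single comprehension with no inner loop.
import Mathlib
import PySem

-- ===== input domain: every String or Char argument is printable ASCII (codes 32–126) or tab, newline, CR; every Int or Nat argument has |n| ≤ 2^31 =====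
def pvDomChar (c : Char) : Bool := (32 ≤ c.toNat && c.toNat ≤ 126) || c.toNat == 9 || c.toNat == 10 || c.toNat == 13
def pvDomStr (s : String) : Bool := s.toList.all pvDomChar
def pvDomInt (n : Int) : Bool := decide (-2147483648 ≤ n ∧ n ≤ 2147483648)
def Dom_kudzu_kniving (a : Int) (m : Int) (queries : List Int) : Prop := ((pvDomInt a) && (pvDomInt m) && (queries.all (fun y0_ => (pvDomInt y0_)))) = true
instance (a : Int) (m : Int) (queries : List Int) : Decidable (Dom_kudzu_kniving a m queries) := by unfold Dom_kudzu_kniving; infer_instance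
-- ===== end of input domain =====

-- B replaces A's per-query bit-subtracting while loop by the closed form
-- (v+1).bit_length() - 1 (0 for nonpositive v): more idiomatic, no inner loop.

-- Shared port of the builtin pow(2, e, 10**9+7): for e < 0 CPython first replaces the
-- base by its modular inverse (inverse of 2 mod 10**9+7 is 500000004) and negates e;
-- exact here because 10**9+7 is prime, so 2 is invertible.
def pyPowTwoMod (e : Int) : Int :=
  if 0 ≤ e then PySem.Int.powMod 2 e.toNat 1000000007
  else PySem.Int.powMod 500000004 (-e).toNat 1000000007

-- ===== PORT A =====
-- the `while v >= (1 << depth): v -= (1 << depth); depth += 1` loop (1 << depth = 2^depth)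
def depthLoopA (v : Int) (d : Nat) : Nat :=
  if (2:Int)^d ≤ v then depthLoopA (v - 2^d) (d+1) else d
termination_by v.toNat
decreasing_by
  have h1 : (0:Int) < 2^d := pow_pos (by norm_num) d
  omega

def kudzu_kniving (a : Int) (m : Int) (queries : List Int) : List Int :=
  queries.foldl (fun results v => results ++ [pyPowTwoMod (a - (depthLoopA v 0 : Int))]) []

-- ===== PORT B =====
def kudzu_kniving_alt (a : Int) (m : Int) (queries : List Int) : List Int :=
  queries.map (fun v =>
    pyPowTwoMod (a - (if 0 < v then (PySem.Int.bitLength (v + 1) : Int) - 1 else 0)))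

-- ===== PRECONDITION & SPEC =====
def Spec_kudzu_kniving (a : Int) (m : Int) (queries : List Int) (out : List Int) : Prop := out = kudzu_kniving_alt a m queries
instance (a : Int) (m : Int) (queries : List Int) (out : List Int) : Decidable (Spec_kudzu_kniving a m queries out) := by unfold Spec_kudzu_kniving; infer_instance

-- ===== CLAIM (what is proved, stated in full; the proofs are below) =====
def Claim_equal_kudzu_kniving : Prop := ∀ (a : Int) (m : Int) (queries : List Int), Dom_kudzu_kniving a m queries → Spec_kudzu_kniving a m queries (kudzu_kniving a m queries)

-- ===== LEMMAS AND PROOFS =====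

-- a number sandwiched between 2^d and 2^(d+1) has bit length d+1
lemma bitLength_sandwich (n : Int) (d : Nat) (h1 : (2:Int)^d ≤ n) (h2 : n < 2^(d+1)) :
    PySem.Int.bitLength n = d + 1 := by
  have hn0 : n ≠ 0 := by
    have : (0:Int) < 2^d := pow_pos (by norm_num) d
    omega
  have hub := PySem.Int.lt_two_pow_bitLength n
  have hlb := PySem.Int.two_pow_bitLength_le n hn0
  have hna : n.natAbs = n.toNat := by omega
  have h1' : 2^d ≤ n.natAbs := by
    have : ((2:Int)^d) = ((2^d : Nat) : Int) := by push_cast; ring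
    omega
  have h2' : n.natAbs < 2^(d+1) := by
    have : ((2:Int)^(d+1)) = ((2^(d+1) : Nat) : Int) := by push_cast; ring
    omega
  set b := PySem.Int.bitLength n with hb
  have hd_lt_b : d < b := by
    have : (2:Nat)^d < 2^b := lt_of_le_of_lt h1' hub
    exact (Nat.pow_lt_pow_iff_right (by norm_num)).mp this
  have hb_le : b - 1 < d + 1 := by
    have : (2:Nat)^(b-1) < 2^(d+1) := lt_of_le_of_lt hlb h2'
    exact (Nat.pow_lt_pow_iff_right (by norm_num)).mp this
  omega

-- A's loop, started at (v, d) with 0 ≤ v, yields bitLength (v + 2^d) - 1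
lemma depthLoopA_eq (v : Int) (d : Nat) (hv : 0 ≤ v) :
    depthLoopA v d + 1 = PySem.Int.bitLength (v + 2^d) := by
  induction v, d using depthLoopA.induct with
  | case1 v d hle ih =>
    rw [depthLoopA, if_pos hle]
    have hv' : 0 ≤ v - 2^d := by omega
    have := ih hv'
    have harg : v - 2^d + 2^(d+1) = v + 2^d := by ring
    rw [harg] at this
    omega
  | case2 v d hlt =>
    rw [depthLoopA, if_neg hlt]
    have h1 : (2:Int)^d ≤ v + 2^d := by omega
    have h2 : v + 2^d < 2^(d+1) := by
      have : (2:Int)^(d+1) = 2^d + 2^d := by ring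
      omega
    rw [bitLength_sandwich (v + 2^d) d h1 h2]

lemma depthLoopA_cast (v : Int) :
    (depthLoopA v 0 : Int) =
      (if 0 < v then (PySem.Int.bitLength (v + 1) : Int) - 1 else 0) := by
  by_cases hv : 0 < v
  · rw [if_pos hv]
    have := depthLoopA_eq v 0 (by omega)
    simp only [pow_zero] at this
    omega
  · rw [if_neg hv]
    rw [depthLoopA]
    simp only [pow_zero]
    rw [if_neg (by omega)]
    rfl

-- ===== VERDICT (by name: the statement is the Claim_ definition above) =====
theorem kudzu_kniving_spec : Claim_equal_kudzu_kniving := by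
  intro a m queries _
  unfold Spec_kudzu_kniving kudzu_kniving kudzu_kniving_alt
  rw [PySem.List.foldl_append_singleton_eq_map]
  apply List.map_congr_left
  intro v _
  rw [depthLoopA_cast]
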